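-- pv_equiv track=rewrite | github.com/itspuneet/Python-Programs | bayblade.py | bayblade
-- ===== SOURCE A (Python) =====
-- def bayblade(n,a,b):
--     a.sort()
--     b.sort()
--     c,i,k=0,0,0
--     while i<len(a):
--         j=k
--         while j<len(b):
--             if a[i]>b[j]:
--                 k=j+1
--                 c+=1
--                 break
--             j+=1
--         i+=1
--     return c
-- ===== SOURCE B (Python) =====
-- def bayblade(n, a, b):
--     a.sort()
--     b.sort()
--     c = 0
--     k = 0
--     for x in a:
--         if k < len(b) and x > b[k]:
--             c += 1
--             k += 1
--     return c
-- ===== Notes on version B (the rewrite author's own statement) =====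
-- stated objective: faster
-- what changed: Replaced the nested rescan-from-k inner while loop by a single two-pointer sweep over the sorted lists (one comparison per element of a), exploiting that in a sorted b only b[k] can be the first unmatched beatable element.
import Mathlib
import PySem

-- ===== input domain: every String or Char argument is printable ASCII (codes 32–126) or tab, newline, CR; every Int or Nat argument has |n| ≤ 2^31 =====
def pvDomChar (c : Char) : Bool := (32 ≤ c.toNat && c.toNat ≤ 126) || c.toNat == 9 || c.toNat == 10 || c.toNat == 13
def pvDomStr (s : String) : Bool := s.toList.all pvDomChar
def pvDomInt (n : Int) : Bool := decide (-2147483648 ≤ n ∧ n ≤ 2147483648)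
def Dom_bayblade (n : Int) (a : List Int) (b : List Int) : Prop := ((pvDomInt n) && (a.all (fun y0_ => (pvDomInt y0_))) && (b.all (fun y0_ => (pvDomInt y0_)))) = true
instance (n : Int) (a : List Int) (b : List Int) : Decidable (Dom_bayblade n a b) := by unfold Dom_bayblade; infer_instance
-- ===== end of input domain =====

-- B replaces A's nested inner rescan by a two-pointer sweep (asymptotically faster after sort).
-- Both A and B sort the argument lists in place; the equivalence proved here is about the return value
-- (the in-place mutation is identical in A and B anyway).

-- ===== PORT A =====
-- inner while loop: scan j from its start value upward, return the first j with ai > b[j] (none = loop fell through)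
def pvInnerA (ai : Int) (b : List Int) (j : Nat) : Option Nat :=
  if j < b.length then
    if ai > b.getD j 0 then some j
    else pvInnerA ai b (j + 1)
  else none
termination_by b.length - j

-- outer while loop over i, carrying k and c
def pvOuterA (a b : List Int) (i k : Nat) (c : Int) : Int :=
  if i < a.length then
    match pvInnerA (a.getD i 0) b k with
    | some j => pvOuterA a b (i + 1) (j + 1) (c + 1)
    | none   => pvOuterA a b (i + 1) k c
  else c
termination_by a.length - i

def bayblade (n : Int) (a : List Int) (b : List Int) : Int :=
  pvOuterA (PySem.List.sorted a (fun x => x) false) (PySem.List.sorted b (fun x => x) false) 0 0 0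

-- ===== PORT B =====
-- one step of the for-loop over sorted a, state = (k, c)
def pvStepB (sb : List Int) (s : Nat × Int) (x : Int) : Nat × Int :=
  if s.1 < sb.length ∧ x > sb.getD s.1 0 then (s.1 + 1, s.2 + 1) else s

def bayblade_alt (n : Int) (a : List Int) (b : List Int) : Int :=
  let sa := PySem.List.sorted a (fun x => x) false
  let sb := PySem.List.sorted b (fun x => x) false
  (sa.foldl (pvStepB sb) (0, 0)).2

-- ===== PRECONDITION & SPEC =====
def Spec_bayblade (n : Int) (a : List Int) (b : List Int) (out : Int) : Prop := out = bayblade_alt n a b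
instance (n : Int) (a : List Int) (b : List Int) (out : Int) : Decidable (Spec_bayblade n a b out) := by unfold Spec_bayblade; infer_instance

-- ===== CLAIM (what is proved, stated in full; the proofs are below) =====
def Claim_equal_bayblade : Prop := ∀ (n : Int) (a : List Int) (b : List Int), Dom_bayblade n a b → Spec_bayblade n a b (bayblade n a b)

-- ===== LEMMAS AND PROOFS =====

-- On a nondecreasing b, the inner scan either succeeds immediately at its start index or fails.
theorem pvInnerA_sorted (ai : Int) (b : List Int) (hb : b.Pairwise (· ≤ ·)) (j : Nat) :
    pvInnerA ai b j = if j < b.length ∧ ai > b.getD j 0 then some j else none := by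
  induction j using pvInnerA.induct ai b with
  | case1 j hj hgt =>
    rw [pvInnerA, if_pos hj, if_pos hgt, if_pos ⟨hj, hgt⟩]
  | case2 j hj hgt ih =>
    have hne : ¬ (j + 1 < b.length ∧ ai > b.getD (j + 1) 0) := by
      rintro ⟨h1, h2⟩
      have hle : b.getD j 0 ≤ b.getD (j + 1) 0 := by
        rw [List.getD_eq_getElem b 0 hj, List.getD_eq_getElem b 0 h1]
        exact List.pairwise_iff_getElem.mp hb j (j + 1) hj h1 (by omega)
      omega
    rw [pvInnerA, if_pos hj, if_neg hgt, ih, if_neg hne, if_neg (fun h => hgt h.2)]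
  | case3 j hj =>
    rw [pvInnerA, if_neg hj, if_neg (fun h => hj h.1)]

-- The outer loop on a nondecreasing b is the two-pointer fold over the remaining suffix of a.
theorem pvOuterA_eq_foldl (a b : List Int) (hb : b.Pairwise (· ≤ ·)) :
    ∀ i k c, pvOuterA a b i k c = ((a.drop i).foldl (pvStepB b) (k, c)).2 := by
  intro i k c
  induction i, k, c using pvOuterA.induct a b with
  | case1 i k c hi j hj ih =>
    rw [pvOuterA, if_pos hi, pvInnerA_sorted _ _ hb]
    rw [pvInnerA_sorted _ _ hb] at hj
    split at hj
    · rename_i hcond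
      cases hj
      rw [if_pos hcond]
      show pvOuterA a b (i + 1) (k + 1) (c + 1) = _
      rw [ih, List.drop_eq_getElem_cons hi, List.foldl_cons]
      congr 1
      unfold pvStepB
      rw [if_pos ⟨hcond.1, by rw [← List.getD_eq_getElem a 0 hi]; exact hcond.2⟩]
    · exact absurd hj (by simp)
  | case2 i k c hi hj ih =>
    rw [pvOuterA, if_pos hi, pvInnerA_sorted _ _ hb]
    rw [pvInnerA_sorted _ _ hb] at hj
    split at hj
    · exact absurd hj (by simp)
    · rename_i hcond
      rw [if_neg hcond]
      show pvOuterA a b (i + 1) k c = _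
      rw [ih, List.drop_eq_getElem_cons hi, List.foldl_cons]
      congr 1
      unfold pvStepB
      rw [if_neg (fun h => hcond ⟨h.1, by rw [List.getD_eq_getElem a 0 hi]; exact h.2⟩)]
  | case3 i k c hi =>
    rw [pvOuterA, if_neg hi, List.drop_eq_nil_of_le (by omega : a.length ≤ i)]
    rfl

-- ===== VERDICT (by name: the statement is the Claim_ definition above) =====
theorem bayblade_spec : Claim_equal_bayblade := by
  intro n a b _
  unfold Spec_bayblade bayblade bayblade_alt
  rw [pvOuterA_eq_foldl _ _ (PySem.List.sorted_pairwise b (fun x => x) : _) 0 0 0]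
  simp
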